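-- pv_equiv track=rewrite | github.com/pkrajput/personality_induction | utils_full_eval.py | split_responses_by_trait
-- ===== SOURCE A (Python) =====
-- def split_responses_by_trait(questions_dict: dict, responses_dict: dict) -> list:
--     """
--     Split the responses based on the number of questions in each trait for 32 samples.
--
--     Args:
--         questions_dict (dict): Dictionary containing the questions for each trait.
--                                Format: {trait: [{"question": str, "math": int}, ...]}.
--         responses_dict (dict): Dictionary containing responses for each trait.
--                                Format: {'trait': [responses]}.
--
--     Returns:
--         list: A list of response dictionaries split into 32 samples.
--               Format: [{trait: [responses]}, ...].
--     """
--     # Calculate the number of questions per trait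
--     question_counts = {
--         trait: len(questions) for trait, questions in questions_dict.items()
--     }
--
--     # Initialize a list to store the 32 samples
--     total_samples = 32
--     split_samples = [{} for _ in range(total_samples)]
--
--     # For each trait, split responses into 32 chunks
--     for trait, responses in responses_dict.items():
--         chunk_size = question_counts[
--             trait
--         ]  # Determine the number of responses needed for each sample
--         assert (
--             len(responses) == total_samples * chunk_size
--         ), f"Mismatch in response length for {trait}. Expected: {total_samples * chunk_size}, Got: {len(responses)}"
--
--         # Split the responses into chunks for each sample
--         for i in range(total_samples):
--             start = i * chunk_size
--             end = start + chunk_size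
--             split_samples[i][trait] = responses[start:end]
--
--     return split_samples
-- ===== SOURCE B (Python) =====
-- def split_responses_by_trait(questions_dict: dict, responses_dict: dict) -> list:
--     """Same result as A, by a different algorithm: after validating lengths, peel
--     the 32 samples off the FRONT of every trait's response list recursively --
--     each step takes the first chunk of each trait and recurses on the remainders,
--     with no index arithmetic or slicing by position."""
--     counts = {trait: len(questions) for trait, questions in questions_dict.items()}
--     for trait, responses in responses_dict.items():
--         assert (
--             len(responses) == 32 * counts[trait]
--         ), f"Mismatch in response length for {trait}. Expected: {32 * counts[trait]}, Got: {len(responses)}"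
--
--     def peel(remaining, k):
--         if k == 0:
--             return []
--         sample = {}
--         rest = {}
--         for trait, responses in remaining.items():
--             c = counts[trait]
--             sample[trait] = responses[:c]
--             rest[trait] = responses[c:]
--         return [sample] + peel(rest, k - 1)
--
--     return peel(dict(responses_dict), 32)
-- ===== Notes on version B (the rewrite author's own statement) =====
-- stated objective: alternative
-- what changed: A computes each chunk by index arithmetic (start = i*chunk_size) writing into 32 preallocated sample dicts trait-major; B instead peels the samples off recursively: each recursion step takes the first chunk_size responses of every trait's remaining list and recurses on the tails, so chunks are consumed from the front with no positional indexing.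
import Mathlib
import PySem

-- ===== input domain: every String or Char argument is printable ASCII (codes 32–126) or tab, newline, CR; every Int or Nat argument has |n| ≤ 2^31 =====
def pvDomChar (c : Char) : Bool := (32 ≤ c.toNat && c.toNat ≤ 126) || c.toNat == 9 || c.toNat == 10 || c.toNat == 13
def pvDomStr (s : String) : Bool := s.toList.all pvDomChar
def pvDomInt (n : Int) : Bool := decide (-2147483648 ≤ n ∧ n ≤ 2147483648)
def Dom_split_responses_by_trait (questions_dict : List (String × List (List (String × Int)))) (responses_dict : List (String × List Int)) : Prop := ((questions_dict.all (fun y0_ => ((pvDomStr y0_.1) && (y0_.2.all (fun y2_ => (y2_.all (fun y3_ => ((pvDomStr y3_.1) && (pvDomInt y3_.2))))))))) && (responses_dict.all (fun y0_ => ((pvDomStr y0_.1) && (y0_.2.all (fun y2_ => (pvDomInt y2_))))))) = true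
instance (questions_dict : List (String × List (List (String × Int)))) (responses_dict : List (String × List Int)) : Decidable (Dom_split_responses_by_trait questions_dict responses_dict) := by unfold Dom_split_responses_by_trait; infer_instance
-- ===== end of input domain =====

-- B replaces A's index-arithmetic slicing (start = i*chunk_size into preallocated sample dicts)
-- by a recursion that peels each of the 32 samples off the FRONT of every trait's remaining
-- list and recurses on the tails (objective: alternative algorithm, same cost).

-- ===== PORT A =====
-- question_counts = {trait: len(questions) for ...}; split_samples = [{} for _ in range(32)];
-- then, per trait of responses_dict, for i in range(32): split_samples[i][trait] = responses[i*c : i*c+c].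
-- The KeyError on question_counts[trait] and the AssertionError of the length assert are excluded by Pre_.
def split_responses_by_trait (questions_dict : List (String × List (List (String × Int)))) (responses_dict : List (String × List Int)) : List (List (String × List Int)) :=
  let question_counts : PySem.Dict String Int :=
    questions_dict.foldl (fun d q => d.insert q.1 (q.2.length : Int)) PySem.Dict.empty
  let split_samples : List (PySem.Dict String (List Int)) :=
    (List.range 32).map (fun _ => PySem.Dict.empty)
  let split_samples := responses_dict.foldl (fun samples p =>
    match question_counts.get? p.1 with
    | none => samples
    | some chunk_size =>
      (List.range 32).foldl (fun samples i =>
        samples.set i ((samples.getD i PySem.Dict.empty).insert p.1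
          (PySem.List.slice p.2 (some ((i : Int) * chunk_size)) (some ((i : Int) * chunk_size + chunk_size)))))
        samples) split_samples
  split_samples.map (·.items)


-- ===== PORT B =====
-- peel(remaining, k): if k == 0 return []; one loop over remaining builds sample (responses[:c])
-- and rest (responses[c:]); return [sample] + peel(rest, k-1).
-- counts[trait] would raise KeyError only outside Pre_ (the assert loop raises first); ported as getD 0.
def pvPeel (counts : PySem.Dict String Int) : List (String × List Int) → Nat → List (List (String × List Int))
  | _, 0 => []
  | remaining, Nat.succ k =>
    let sr := remaining.foldl (fun (sr : PySem.Dict String (List Int) × PySem.Dict String (List Int)) p =>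
        ((sr.1.insert p.1 (PySem.List.slice p.2 none (some ((counts.get? p.1).getD 0)))),
         (sr.2.insert p.1 (PySem.List.slice p.2 (some ((counts.get? p.1).getD 0)) none))))
      (PySem.Dict.empty, PySem.Dict.empty)
    sr.1.items :: pvPeel counts sr.2.items k

-- counts = {trait: len(questions) ...}; the assert loop only validates (its KeyError /
-- AssertionError cases are excluded by Pre_), then return peel(dict(responses_dict), 32).
def split_responses_by_trait_alt (questions_dict : List (String × List (List (String × Int)))) (responses_dict : List (String × List Int)) : List (List (String × List Int)) :=
  let counts : PySem.Dict String Int :=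
    questions_dict.foldl (fun d q => d.insert q.1 (q.2.length : Int)) PySem.Dict.empty
  pvPeel counts responses_dict 32


-- ===== PRECONDITION & SPEC =====
-- Pre_ excludes: association lists with duplicate keys (no Python dict exhibits them, so any
-- behaviour there is an accident of the list encoding), traits of responses_dict missing from
-- questions_dict (A raises KeyError there), and response lists whose length is not 32 × the
-- trait's question count (A's assert raises AssertionError there).
def Pre_split_responses_by_trait (questions_dict : List (String × List (List (String × Int)))) (responses_dict : List (String × List Int)) : Prop :=
  (questions_dict.map Prod.fst).Nodup ∧ (responses_dict.map Prod.fst).Nodup ∧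
  ∀ p ∈ responses_dict, ∃ q ∈ questions_dict, q.1 = p.1 ∧ p.2.length = 32 * q.2.length
instance (questions_dict : List (String × List (List (String × Int)))) (responses_dict : List (String × List Int)) : Decidable (Pre_split_responses_by_trait questions_dict responses_dict) := by unfold Pre_split_responses_by_trait; infer_instance

def pvWitness_split_responses_by_trait : (List (String × List (List (String × Int)))) × (List (String × List Int)) :=
  ([("agreeableness", [[("math", 3)]])],
   [("agreeableness", [1, 2, 3, 4, 5, 1, 2, 3, 4, 5, 1, 2, 3, 4, 5, 1, 2, 3, 4, 5, 1, 2, 3, 4, 5, 1, 2, 3, 4, 5, 1, 2])])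

def Spec_split_responses_by_trait (questions_dict : List (String × List (List (String × Int)))) (responses_dict : List (String × List Int)) (out : List (List (String × List Int))) : Prop := out = split_responses_by_trait_alt questions_dict responses_dict
instance (questions_dict : List (String × List (List (String × Int)))) (responses_dict : List (String × List Int)) (out : List (List (String × List Int))) : Decidable (Spec_split_responses_by_trait questions_dict responses_dict out) := by unfold Spec_split_responses_by_trait; infer_instance

-- ===== CLAIM (what is proved, stated in full; the proofs are below) =====
def Claim_equal_split_responses_by_trait : Prop := ∀ (questions_dict : List (String × List (List (String × Int)))) (responses_dict : List (String × List Int)), Dom_split_responses_by_trait questions_dict responses_dict → Pre_split_responses_by_trait questions_dict responses_dict → Spec_split_responses_by_trait questions_dict responses_dict (split_responses_by_trait questions_dict responses_dict)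

-- ===== LEMMAS AND PROOFS =====

def pvCs (questions_dict : List (String × List (List (String × Int)))) (p : String × List Int) : Int :=
  ((((PySem.Dict.mk questions_dict).get? p.1).getD []).length : Int)

def pvCN (questions_dict : List (String × List (List (String × Int)))) (t : String) : Nat :=
  (((PySem.Dict.mk questions_dict).get? t).getD []).length

def pvChA (questions_dict : List (String × List (List (String × Int)))) (p : String × List Int) (i : Nat) : String × List Int :=
  (p.1, PySem.List.slice p.2 (some ((i : Int) * pvCs questions_dict p))
        (some ((i : Int) * pvCs questions_dict p + pvCs questions_dict p)))


theorem get?_mk_map {ν : Type} (f : List (List (String × Int)) → ν)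
    (qd : List (String × List (List (String × Int)))) (t : String) :
    (PySem.Dict.mk (qd.map (fun q => (q.1, f q.2)))).get? t = ((PySem.Dict.mk qd).get? t).map f := by
  induction qd with
  | nil => rfl
  | cons q rest ih =>
      obtain ⟨k, v⟩ := q
      simp only [List.map_cons, PySem.Dict.get?_mk_cons]
      split <;> simp [ih]


theorem foldl_set_length {α : Type} (g : Nat → α → α) (d : α) :
    ∀ (l : List Nat) (ss : List α),
      (l.foldl (fun ss i => ss.set i (g i (ss.getD i d))) ss).length = ss.length := by
  intro l
  induction l with
  | nil => intro ss; rfl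
  | cons i l ih => intro ss; rw [List.foldl_cons, ih, List.length_set]


theorem foldl_set_getElem? {α : Type} (g : Nat → α → α) (d : α) :
    ∀ (n : Nat) (ss : List α) (j : Nat),
      ((List.range n).foldl (fun ss i => ss.set i (g i (ss.getD i d))) ss)[j]? =
        if j < n then (ss[j]?.map (g j)) else ss[j]? := by
  intro n
  induction n with
  | zero => intro ss j; simp
  | succ n ih =>
    intro ss j
    rw [List.range_succ, List.foldl_append, List.foldl_cons, List.foldl_nil,
        List.getElem?_set]
    by_cases hjn : n = j
    · subst hjn
      have hp1 : (List.foldl (fun ss i => ss.set i (g i (ss.getD i d))) ss (List.range n))[n]? = ss[n]? := by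
        rw [ih]; simp
      have hp2 := foldl_set_length g d (List.range n) ss
      rw [hp2, List.getD_eq_getElem?_getD, hp1]
      by_cases hl : n < ss.length
      · rw [if_pos hl, List.getElem?_eq_getElem hl]
        simp
      · rw [List.getElem?_eq_none (Nat.le_of_not_lt hl), if_neg hl]
        simp
    · rw [if_neg hjn, ih]
      by_cases h1 : j < n
      · simp [h1, Nat.lt_succ_of_lt h1]
      · have h2 : ¬ j < n + 1 := by omega
        simp [h1, h2]


theorem foldl_set_range_map {α : Type} (g : Nat → α → α) (d : α) (D : Nat → α) (n : Nat) :
    (List.range n).foldl (fun ss i => ss.set i (g i (ss.getD i d))) ((List.range n).map D) =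
      (List.range n).map (fun i => g i (D i)) := by
  apply List.ext_getElem?
  intro j
  rw [foldl_set_getElem? g d n]
  by_cases hj : j < n
  · rw [if_pos hj, List.getElem?_map, List.getElem?_map, List.getElem?_range hj]
    rfl
  · have h0 : (List.range n)[j]? = none := List.getElem?_eq_none (by simpa using Nat.le_of_not_lt hj)
    rw [if_neg hj, List.getElem?_map, List.getElem?_map, h0]
    rfl


theorem A_outer (qd : List (String × List (List (String × Int)))) (qc : PySem.Dict String Int) :
    ∀ (l acc : List (String × List Int)),
      ((acc ++ l).map Prod.fst).Nodup →
      (∀ p ∈ l, qc.get? p.1 = some (pvCs qd p)) →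
      l.foldl (fun samples p =>
        match qc.get? p.1 with
        | none => samples
        | some chunk_size =>
          (List.range 32).foldl (fun samples i =>
            samples.set i ((samples.getD i PySem.Dict.empty).insert p.1
              (PySem.List.slice p.2 (some ((i : Int) * chunk_size)) (some ((i : Int) * chunk_size + chunk_size)))))
            samples)
        ((List.range 32).map (fun i => PySem.Dict.mk (acc.map (fun p => pvChA qd p i)))) =
      (List.range 32).map (fun i => PySem.Dict.mk ((acc ++ l).map (fun p => pvChA qd p i))) := by
  intro l
  induction l with
  | nil => intro acc _ _; simp
  | cons p l ih =>
    intro acc hnd hlook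
    have hq := hlook p (List.mem_cons_self)
    rw [List.foldl_cons]
    split
    · next h => rw [hq] at h; cases h
    next cs h =>
    rw [hq] at h
    obtain rfl := Option.some.inj h
    rw [foldl_set_range_map (fun i D => D.insert p.1
          (PySem.List.slice p.2 (some ((i : Int) * pvCs qd p)) (some ((i : Int) * pvCs qd p + pvCs qd p))))
        PySem.Dict.empty]
    have hfresh : p.1 ∉ acc.map Prod.fst := by
      have hnd' := hnd
      rw [List.map_append] at hnd'
      intro hmem
      exact List.disjoint_of_nodup_append hnd' hmem (by simp)
    have hstep : ∀ i : Nat,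
        (PySem.Dict.mk (acc.map (fun p => pvChA qd p i))).insert p.1
          (PySem.List.slice p.2 (some ((i : Int) * pvCs qd p)) (some ((i : Int) * pvCs qd p + pvCs qd p))) =
        PySem.Dict.mk ((acc ++ [p]).map (fun p => pvChA qd p i)) := by
      intro i
      apply PySem.Dict.ext
      rw [PySem.Dict.items_insert_of_not_contains]
      · simp [pvChA]
      · rw [PySem.Dict.contains_eq_decide_mem_keys]
        simp only [PySem.Dict.keys_mk, decide_eq_false_iff_not]
        intro hmem
        apply hfresh
        simpa [pvChA, List.map_map, Function.comp] using hmem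
    have hinit : ((List.range 32).map (fun i =>
        (PySem.Dict.mk (acc.map (fun p => pvChA qd p i))).insert p.1
          (PySem.List.slice p.2 (some ((i : Int) * pvCs qd p)) (some ((i : Int) * pvCs qd p + pvCs qd p))))) =
        (List.range 32).map (fun i => PySem.Dict.mk ((acc ++ [p]).map (fun p => pvChA qd p i))) := by
      exact List.map_congr_left (fun i _ => hstep i)
    rw [hinit, ih (acc ++ [p]) (by simpa using hnd) (fun x hx => hlook x (List.mem_cons_of_mem _ hx))]
    simp


theorem counts_lookup (qd : List (String × List (List (String × Int)))) (rd : List (String × List Int))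
    (hq : (qd.map Prod.fst).Nodup)
    (hex : ∀ p ∈ rd, ∃ q ∈ qd, q.1 = p.1) :
    ∀ p ∈ rd,
      (qd.foldl (fun d q => d.insert q.1 (q.2.length : Int)) PySem.Dict.empty).get? p.1 =
        some ((pvCN qd p.1 : Int)) := by
  have hqc : qd.foldl (fun d q => d.insert q.1 (q.2.length : Int)) PySem.Dict.empty =
      PySem.Dict.mk (qd.map (fun q => (q.1, ((fun v : List (List (String × Int)) => (v.length : Int)) q.2)))) := by
    apply PySem.Dict.ext
    rw [PySem.Dict.items_foldl_insert_fresh qd Prod.fst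
        (fun q => (q.2.length : Int)) PySem.Dict.empty
        (fun a _ => PySem.Dict.contains_empty _) hq]
    rfl
  intro p hp
  obtain ⟨q, hqm, hqe⟩ := hex p hp
  have h2 : (PySem.Dict.mk qd).get? p.1 = some q.2 := by
    apply PySem.Dict.get?_of_mem_items
    · show (p.1, q.2) ∈ (PySem.Dict.mk qd).items
      rw [← hqe]
      simpa using hqm
    · simpa [PySem.Dict.keys] using hq
  rw [hqc, get?_mk_map (fun v : List (List (String × Int)) => (v.length : Int)) qd p.1, h2]
  simp [pvCN, h2]


theorem A_closed (qd : List (String × List (List (String × Int)))) (rd : List (String × List Int))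
    (hq : (qd.map Prod.fst).Nodup) (hr : (rd.map Prod.fst).Nodup)
    (hex : ∀ p ∈ rd, ∃ q ∈ qd, q.1 = p.1) :
    split_responses_by_trait qd rd =
      (List.range 32).map (fun i => rd.map (fun p => pvChA qd p i)) := by
  unfold split_responses_by_trait
  have hlook : ∀ p ∈ rd,
      (qd.foldl (fun d q => d.insert q.1 (q.2.length : Int)) PySem.Dict.empty).get? p.1 =
        some (pvCs qd p) := by
    intro p hp
    exact counts_lookup qd rd hq hex p hp
  have hmain := A_outer qd (qd.foldl (fun d q => d.insert q.1 (q.2.length : Int)) PySem.Dict.empty)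
      rd [] (by simpa using hr) hlook
  simp only [List.nil_append] at hmain
  dsimp only
  rw [show ((List.range 32).map (fun _ => (PySem.Dict.empty : PySem.Dict String (List Int)))) =
      (List.range 32).map (fun i => PySem.Dict.mk (([] : List (String × List Int)).map (fun p => pvChA qd p i))) from rfl]
  rw [hmain, List.map_map]
  rfl


theorem foldl_pair {α β γ : Type} (f : α → γ → α) (g : β → γ → β) :
    ∀ (l : List γ) (a : α) (b : β),
      l.foldl (fun sr x => (f sr.1 x, g sr.2 x)) (a, b) = (l.foldl f a, l.foldl g b) := by
  intro l
  induction l with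
  | nil => intro a b; rfl
  | cons x l ih => intro a b; simp [List.foldl_cons, ih]


theorem peel_closed (counts : PySem.Dict String Int) (cN : String → Nat) :
    ∀ (k : Nat) (rem : List (String × List Int)),
      (rem.map Prod.fst).Nodup →
      (∀ p ∈ rem, counts.get? p.1 = some ((cN p.1 : Int))) →
      pvPeel counts rem k =
        (List.range k).map (fun i => rem.map (fun p => (p.1, (p.2.drop (i * cN p.1)).take (cN p.1)))) := by
  intro k
  induction k with
  | zero => intro rem _ _; rfl
  | succ k ih =>
    intro rem hnd hlook
    simp only [pvPeel]
    rw [foldl_pair (fun d (p : String × List Int) => d.insert p.1 (PySem.List.slice p.2 none (some ((counts.get? p.1).getD 0))))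
        (fun d (p : String × List Int) => d.insert p.1 (PySem.List.slice p.2 (some ((counts.get? p.1).getD 0)) none)) rem PySem.Dict.empty PySem.Dict.empty]
    have hsample : (rem.foldl (fun d (p : String × List Int) => d.insert p.1 (PySem.List.slice p.2 none (some ((counts.get? p.1).getD 0)))) PySem.Dict.empty).items
        = rem.map (fun p => (p.1, p.2.take (cN p.1))) := by
      rw [PySem.Dict.items_foldl_insert_fresh rem Prod.fst
          (fun p => PySem.List.slice p.2 none (some ((counts.get? p.1).getD 0))) PySem.Dict.empty
          (fun a _ => PySem.Dict.contains_empty _) hnd]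
      have he : (PySem.Dict.empty : PySem.Dict String (List Int)).items = [] := rfl
      rw [he, List.nil_append]
      apply List.map_congr_left
      intro p hp
      rw [hlook p hp]
      simp [PySem.List.slice_to_natCast]
    have hrest : (rem.foldl (fun d (p : String × List Int) => d.insert p.1 (PySem.List.slice p.2 (some ((counts.get? p.1).getD 0)) none)) PySem.Dict.empty).items
        = rem.map (fun p => (p.1, p.2.drop (cN p.1))) := by
      rw [PySem.Dict.items_foldl_insert_fresh rem Prod.fst
          (fun p => PySem.List.slice p.2 (some ((counts.get? p.1).getD 0)) none) PySem.Dict.empty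
          (fun a _ => PySem.Dict.contains_empty _) hnd]
      have he : (PySem.Dict.empty : PySem.Dict String (List Int)).items = [] := rfl
      rw [he, List.nil_append]
      apply List.map_congr_left
      intro p hp
      rw [hlook p hp]
      simp [PySem.List.slice_from_natCast]
    simp only [hsample, hrest]
    have hnd' : ((rem.map (fun p => (p.1, p.2.drop (cN p.1)))).map Prod.fst).Nodup := by
      simpa [List.map_map, Function.comp] using hnd
    have hlook' : ∀ p ∈ rem.map (fun p => (p.1, p.2.drop (cN p.1))), counts.get? p.1 = some ((cN p.1 : Int)) := by
      intro p hp
      obtain ⟨q, hq, rfl⟩ := List.mem_map.mp hp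
      exact hlook q hq
    rw [ih _ hnd' hlook']
    rw [List.range_succ_eq_map, List.map_cons, List.map_map]
    congr 1
    · apply List.map_congr_left
      intro p _
      simp
    · apply List.map_congr_left
      intro i _
      simp only [Function.comp, List.map_map]
      apply List.map_congr_left
      intro p _
      simp only [Function.comp]
      rw [List.drop_drop]
      congr 1
      rw [Nat.succ_eq_add_one]
      ring_nf


theorem B_closed (qd : List (String × List (List (String × Int)))) (rd : List (String × List Int))
    (hq : (qd.map Prod.fst).Nodup) (hr : (rd.map Prod.fst).Nodup)
    (hex : ∀ p ∈ rd, ∃ q ∈ qd, q.1 = p.1) :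
    split_responses_by_trait_alt qd rd =
      (List.range 32).map (fun i => rd.map (fun p => (p.1, (p.2.drop (i * pvCN qd p.1)).take (pvCN qd p.1)))) := by
  unfold split_responses_by_trait_alt
  exact peel_closed _ (pvCN qd) 32 rd hr (counts_lookup qd rd hq hex)


theorem closed_eq (qd : List (String × List (List (String × Int)))) (rd : List (String × List Int)) :
    (List.range 32).map (fun i => rd.map (fun p => pvChA qd p i)) =
      (List.range 32).map (fun i => rd.map (fun p => (p.1, (p.2.drop (i * pvCN qd p.1)).take (pvCN qd p.1)))) := by
  apply List.map_congr_left
  intro i _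
  apply List.map_congr_left
  intro p _
  have hcs : pvCs qd p = ((pvCN qd p.1 : Nat) : Int) := rfl
  rw [pvChA, hcs]
  have h1 : ((i : Int) * ((pvCN qd p.1 : Nat) : Int)) = (((i * pvCN qd p.1 : Nat) : Int)) := by push_cast; rfl
  rw [h1, PySem.List.slice_natCast_add]

-- ===== VERDICT (by name: the statement is the Claim_ definition above) =====
theorem split_responses_by_trait_spec : Claim_equal_split_responses_by_trait := by
  intro qd rd _ hpre
  obtain ⟨hq, hr, hex⟩ := hpre
  show split_responses_by_trait qd rd = split_responses_by_trait_alt qd rd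
  rw [A_closed qd rd hq hr (fun p hp => (hex p hp).elim (fun q hq' => ⟨q, hq'.1, hq'.2.1⟩)),
      B_closed qd rd hq hr (fun p hp => (hex p hp).elim (fun q hq' => ⟨q, hq'.1, hq'.2.1⟩))]
  exact closed_eq qd rd
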